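-- pv_equiv track=rewrite | github.com/Isolatedo/sdsl_project | WSI_data_sample_jcai.py | deduplicate_paths
-- ===== SOURCE A (Python) =====
-- def deduplicate_paths(file_paths):
--     """去重逻辑"""
--     file_dict = {}
--     for path in file_paths:
--         file_name = path.split('/')[-1]
--         if file_name in file_dict:
--             file_dict[file_name].append(path)
--         else:
--             file_dict[file_name] = [path]
--
--     unique_paths = []
--     for file_name, paths in file_dict.items():
--         unique_paths.append(paths[0])
--     return unique_paths
-- ===== SOURCE B (Python) =====
-- def deduplicate_paths(file_paths):
--     """Single pass: keep the first path seen for each distinct filename."""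
--     seen = set()
--     unique_paths = []
--     for path in file_paths:
--         file_name = path.split('/')[-1]
--         if file_name not in seen:
--             seen.add(file_name)
--             unique_paths.append(path)
--     return unique_paths
-- ===== Notes on version B (the rewrite author's own statement) =====
-- stated objective: simpler
-- what changed: Replaces A's two-pass group-into-dict-of-lists-then-take-first-of-each-group with a single pass over the input keeping a seen-set of filenames and appending only first occurrences, never materialising the per-name path lists or running a second pass.
import Mathlib
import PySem

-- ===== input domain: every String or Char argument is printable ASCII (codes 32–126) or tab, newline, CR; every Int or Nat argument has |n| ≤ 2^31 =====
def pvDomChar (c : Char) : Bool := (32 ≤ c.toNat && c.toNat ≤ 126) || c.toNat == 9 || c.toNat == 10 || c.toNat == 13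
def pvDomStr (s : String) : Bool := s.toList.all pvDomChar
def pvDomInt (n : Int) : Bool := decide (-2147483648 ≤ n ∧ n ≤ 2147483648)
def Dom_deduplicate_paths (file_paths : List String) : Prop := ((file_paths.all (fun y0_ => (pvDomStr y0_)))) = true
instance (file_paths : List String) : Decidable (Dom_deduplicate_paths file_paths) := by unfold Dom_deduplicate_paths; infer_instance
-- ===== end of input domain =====

-- B replaces A's two-pass dict-of-lists grouping by a single pass with a seen-set of
-- filenames, appending only the first path per filename (simpler; same result order).


-- ===== PORT A =====
-- path.split('/')[-1]; split never returns an empty list, so the [-1] IndexError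
-- branch (the .getD "") is unreachable — exact on every input.
def pvName (p : String) : String :=
  PySem.List.pyGetD ((PySem.Str.split? p "/").getD []) (-1) ""

-- the first loop of A: group paths into file_dict keyed by filename
def pvGroup : List String → PySem.Dict String (List String) → PySem.Dict String (List String)
  | [], d => d
  | p :: rest, d =>
    let n := pvName p
    if d.contains n then pvGroup rest (d.modify n [] (fun ps => ps ++ [p]))
    else pvGroup rest (d.insert n [p])

-- second loop of A: paths[0] for each group; groups are never empty, so the
-- pyGetD default "" is unreachable — exact.
def deduplicate_paths (file_paths : List String) : List String :=
  (pvGroup file_paths PySem.Dict.empty).items.foldl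
    (fun acc kv => acc ++ [PySem.List.pyGetD kv.2 0 ""]) []

-- ===== PORT B =====
def pvDedup (seen : PySem.Set String) (acc : List String) : List String → List String
  | [] => acc
  | p :: rest =>
    let n := pvName p
    if PySem.Set.contains seen n then pvDedup seen acc rest
    else pvDedup (PySem.Set.add seen n) (acc ++ [p]) rest

def deduplicate_paths_alt (file_paths : List String) : List String :=
  pvDedup PySem.Set.empty [] file_paths

-- ===== PRECONDITION & SPEC =====
def Spec_deduplicate_paths (file_paths : List String) (out : List String) : Prop := out = deduplicate_paths_alt file_paths
instance (file_paths : List String) (out : List String) : Decidable (Spec_deduplicate_paths file_paths out) := by unfold Spec_deduplicate_paths; infer_instance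

-- ===== CLAIM (what is proved, stated in full; the proofs are below) =====
def Claim_equal_deduplicate_paths : Prop := ∀ (file_paths : List String), Dom_deduplicate_paths file_paths → Spec_deduplicate_paths file_paths (deduplicate_paths file_paths)

-- ===== LEMMAS AND PROOFS =====

-- the first element of a nonempty list is unchanged by appending
lemma pv_pyGetD_append (v : List String) (p : String) (hv : v ≠ []) :
    PySem.List.pyGetD (v ++ [p]) 0 "" = PySem.List.pyGetD v 0 "" := by
  rw [PySem.List.pyGetD_ofNat', PySem.List.pyGetD_ofNat']
  cases v with
  | nil => exact absurd rfl hv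
  | cons a t => rfl

-- loop invariant: the dict's keys are exactly B's seen-set (same list), and the
-- heads of the groups collected so far are exactly B's accumulator.
lemma pv_main : ∀ (fps : List String) (d : PySem.Dict String (List String))
    (seen : PySem.Set String) (acc : List String),
    d.keys = seen →
    d.keys.Nodup →
    (∀ kv ∈ d.items, kv.2 ≠ []) →
    acc = d.items.map (fun kv => PySem.List.pyGetD kv.2 0 "") →
    (pvGroup fps d).items.map (fun kv => PySem.List.pyGetD kv.2 0 "") = pvDedup seen acc fps := by
  intro fps
  induction fps with
  | nil => intro d seen acc _ _ _ hacc; simp [pvGroup, pvDedup, hacc]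
  | cons p rest ih =>
    intro d seen acc hkeys hnd hne hacc
    have hcont : PySem.Set.contains seen (pvName p) = d.contains (pvName p) := by
      rcases h : d.contains (pvName p) with _ | _
      · have : pvName p ∉ d.keys := by
          intro hm
          exact absurd (PySem.Dict.contains_iff_mem_keys d (pvName p) |>.mpr hm) (by simp [h])
        simp only [← hkeys]
        simpa [PySem.Set.contains_iff] using this
      · have : pvName p ∈ d.keys := (PySem.Dict.contains_iff_mem_keys d (pvName p)).mp h
        simp only [← hkeys]
        simpa [PySem.Set.contains_iff] using this
    by_cases h : d.contains (pvName p) = true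
    · -- existing filename: A appends to the group, B skips
      have hmod : d.modify (pvName p) [] (fun ps => ps ++ [p])
          = d.insert (pvName p) (d.getD (pvName p) [] ++ [p]) := rfl
      have hitems : (d.insert (pvName p) (d.getD (pvName p) [] ++ [p])).items
          = d.items.map (fun q => if q.1 == pvName p then (pvName p, d.getD (pvName p) [] ++ [p]) else q) :=
        PySem.Dict.items_insert_of_contains d _ h
      simp only [pvGroup, pvDedup, h, hcont, if_pos]
      rw [ih _ seen acc]
      · rw [hmod, PySem.Dict.keys_insert_of_contains d _ h]; exact hkeys
      · rw [hmod, PySem.Dict.keys_insert_of_contains d _ h]; exact hnd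
      · intro kv hkv
        rw [hmod, hitems] at hkv
        obtain ⟨q, hq, hqe⟩ := List.mem_map.mp hkv
        by_cases hq1 : q.1 == pvName p
        · simp [hq1] at hqe; subst hqe; simp
        · simp [hq1] at hqe; subst hqe; exact hne q hq
      · rw [hmod, hitems, List.map_map, hacc]
        apply List.map_congr_left
        intro q hq
        by_cases hq1 : q.1 = pvName p
        · have hmem : (pvName p, q.2) ∈ d.items := by
            rw [← hq1]; exact hq
          have hg : d.getD (pvName p) [] = q.2 := PySem.Dict.getD_of_mem_items d hmem hnd []
          simp only [Function.comp, hq1, beq_self_eq_true, if_true]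
          rw [hg, pv_pyGetD_append _ _ (hne q hq)]
        · simp [hq1]
    · -- new filename: A opens a group [p], B records it
      have h' : d.contains (pvName p) = false := by simpa using h
      have hitems : (d.insert (pvName p) [p]).items = d.items ++ [(pvName p, [p])] :=
        PySem.Dict.items_insert_of_not_contains d _ h'
      have hkeys' : (d.insert (pvName p) [p]).keys = d.keys ++ [pvName p] := by
        rw [PySem.Dict.keys, hitems]; simp [PySem.Dict.keys]
      have hnmem : pvName p ∉ seen := by
        rw [← hkeys]
        intro hm
        exact h ((PySem.Dict.contains_iff_mem_keys d (pvName p)).mpr hm)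
      simp only [pvGroup, pvDedup, h', hcont, Bool.false_eq_true, if_false]
      apply ih
      · rw [hkeys', hkeys, PySem.Set.add_of_not_mem hnmem]
      · rw [hkeys']
        have hnm : pvName p ∉ d.keys := by rw [hkeys]; exact hnmem
        exact List.Nodup.append hnd (List.nodup_singleton _)
          (by simpa [List.disjoint_singleton] using hnm)
      · intro kv hkv
        rw [hitems] at hkv
        rcases List.mem_append.mp hkv with hl | hr
        · exact hne kv hl
        · simp at hr; subst hr; simp
      · rw [hitems, hacc]; simp

-- ===== VERDICT (by name: the statement is the Claim_ definition above) =====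
theorem deduplicate_paths_spec : Claim_equal_deduplicate_paths := by
  intro fps _
  unfold Spec_deduplicate_paths deduplicate_paths deduplicate_paths_alt
  rw [PySem.List.foldl_append_singleton_eq_map]
  exact pv_main fps PySem.Dict.empty PySem.Set.empty [] rfl (by simp [PySem.Dict.empty]) (by simp [PySem.Dict.empty]) rfl
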